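-- pv_equiv track=rewrite | github.com/matthewjpyates/sparseintegers | spintegers/py/sparseMod.py | greaterThanOrEqualTo
-- ===== SOURCE A (Python) =====
-- def greaterThanOrEqualTo(a,b):
--     if(len(b)==0):
--         return True
--     if(len(a)==0):
--         return False
--     if(a[len(a)-1]>b[len(b)-1]):
--         return True
--     if(a[len(a)-1]<b[len(b)-1]):
--                 return False
--     if(len(b)>len(a)):
--         shortLen = len(a)
--     else:
--         shortLen = len(b)
--     for ii in range(1,shortLen+1):
--         if(a[len(a)-ii]!=b[len(b)- ii]):
--             return a[len(a)-ii]>=b[len(b)-ii]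
--     return len(a)>=len(b)
-- ===== SOURCE B (Python) =====
-- def greaterThanOrEqualTo(a, b):
--     # Most-significant-digit-first views; Python's lexicographic list
--     # comparison does the scan and the length tiebreak in one expression.
--     return a[::-1] >= b[::-1]
-- ===== Notes on version B (the rewrite author's own statement) =====
-- stated objective: simpler
-- what changed: Replaces the four guard branches, last-element pre-check and the manual end-to-front index loop by a single lexicographic >= on the reversed (most-significant-first) representations, whose semantics supply the element scan, empty-list guards and length tiebreak.
import Mathlib
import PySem

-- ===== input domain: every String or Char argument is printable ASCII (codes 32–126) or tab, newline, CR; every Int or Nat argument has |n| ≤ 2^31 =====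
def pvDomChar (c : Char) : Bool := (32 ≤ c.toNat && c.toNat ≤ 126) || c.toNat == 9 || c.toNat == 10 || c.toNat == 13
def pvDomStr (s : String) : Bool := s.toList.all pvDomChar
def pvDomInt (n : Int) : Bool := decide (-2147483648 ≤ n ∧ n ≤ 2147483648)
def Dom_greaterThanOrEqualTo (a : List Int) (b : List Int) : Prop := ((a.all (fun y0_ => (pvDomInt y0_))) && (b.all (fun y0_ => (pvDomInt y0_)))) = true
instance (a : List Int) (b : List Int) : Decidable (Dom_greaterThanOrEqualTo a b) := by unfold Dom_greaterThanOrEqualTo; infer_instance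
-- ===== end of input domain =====

-- B replaces A's guard branches and manual end-to-front index loop by one
-- lexicographic >= on the reversed (most-significant-first) lists (objective: simpler).


-- ===== PORT A =====
-- the 'for ii in range(1, shortLen+1)' loop with its early return;
-- the indices len-ii are always in range for 1 ≤ ii ≤ shortLen, so .getD 0 never fires
def greaterThanOrEqualToLoop (a : List Int) (b : List Int) (shortLen : Nat) (ii : Nat) : Bool :=
  if ii ≤ shortLen then
    let av := (PySem.List.pyGet? a ((a.length : Int) - ii)).getD 0
    let bv := (PySem.List.pyGet? b ((b.length : Int) - ii)).getD 0
    if av ≠ bv then decide (av ≥ bv)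
    else greaterThanOrEqualToLoop a b shortLen (ii + 1)
  else decide ((b.length : Int) ≤ (a.length : Int))
termination_by shortLen + 1 - ii

def greaterThanOrEqualTo (a : List Int) (b : List Int) : Bool :=
  if b.length == 0 then true
  else if a.length == 0 then false
  else
    let al := (PySem.List.pyGet? a ((a.length : Int) - 1)).getD 0
    let bl := (PySem.List.pyGet? b ((b.length : Int) - 1)).getD 0
    if al > bl then true
    else if al < bl then false
    else
      let shortLen := if b.length > a.length then a.length else b.length
      greaterThanOrEqualToLoop a b shortLen 1

-- ===== PORT B =====
-- Python's lexicographic list comparison xs >= ys, hand-ported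
def listGE : List Int → List Int → Bool
  | _, [] => true
  | [], _ :: _ => false
  | x :: xs, y :: ys => if x > y then true else if x < y then false else listGE xs ys

def greaterThanOrEqualTo_alt (a : List Int) (b : List Int) : Bool :=
  listGE a.reverse b.reverse

-- ===== PRECONDITION & SPEC =====
def Spec_greaterThanOrEqualTo (a : List Int) (b : List Int) (out : Bool) : Prop := out = greaterThanOrEqualTo_alt a b
instance (a : List Int) (b : List Int) (out : Bool) : Decidable (Spec_greaterThanOrEqualTo a b out) := by unfold Spec_greaterThanOrEqualTo; infer_instance

-- ===== CLAIM (what is proved, stated in full; the proofs are below) =====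
def Claim_equal_greaterThanOrEqualTo : Prop := ∀ (a : List Int) (b : List Int), Dom_greaterThanOrEqualTo a b → Spec_greaterThanOrEqualTo a b (greaterThanOrEqualTo a b)

-- ===== LEMMAS AND PROOFS =====

theorem listGE_cons (x y : Int) (xs ys : List Int) :
    listGE (x :: xs) (y :: ys) = if x > y then true else if x < y then false else listGE xs ys := rfl

theorem pyGet_len_sub (a : List Int) (ii : Nat) (h1 : 1 ≤ ii) (h2 : ii ≤ a.length) :
    (PySem.List.pyGet? a ((a.length : Int) - ii)).getD 0 = a.reverse[ii - 1]'(by simp; omega) := by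
  have hc : ((a.length : Int) - ii) = ((a.length - ii : Nat) : Int) := by push_cast [Nat.cast_sub h2]; ring
  rw [hc, PySem.List.pyGet?_natCast]
  have hlt : a.length - ii < a.length := by omega
  rw [List.getElem?_eq_getElem hlt]
  simp only [List.getElem_reverse, Option.getD_some]
  congr 1
  omega

theorem loop_eq_listGE (a b : List Int) (ii : Nat) (h1 : 1 ≤ ii)
    (h2 : ii ≤ min a.length b.length + 1) :
    greaterThanOrEqualToLoop a b (min a.length b.length) ii
      = listGE (a.reverse.drop (ii - 1)) (b.reverse.drop (ii - 1)) := by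
  by_cases hle : ii ≤ min a.length b.length
  · have hia : ii ≤ a.length := by omega
    have hib : ii ≤ b.length := by omega
    have hda : ii - 1 < a.reverse.length := by simp; omega
    have hdb : ii - 1 < b.reverse.length := by simp; omega
    have ih := loop_eq_listGE a b (ii + 1) (by omega) (by omega)
    have hsucc : ii + 1 - 1 = ii := by omega
    rw [hsucc] at ih
    rw [greaterThanOrEqualToLoop]
    simp only [hle, if_pos]
    rw [pyGet_len_sub a ii h1 hia, pyGet_len_sub b ii h1 hib]
    rw [List.drop_eq_getElem_cons hda, List.drop_eq_getElem_cons hdb, listGE_cons]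
    have hstep : ii - 1 + 1 = ii := by omega
    rw [hstep]
    set x := a.reverse[ii - 1]'hda with hx
    set y := b.reverse[ii - 1]'hdb with hy
    rcases lt_trichotomy x y with h | h | h
    · simp [ne_of_lt h, h, not_le.mpr h, le_of_lt h]
    · simp [h, ih]
    · simp [(ne_of_lt h).symm, h, le_of_lt h]
  · rw [greaterThanOrEqualToLoop]
    simp only [hle, if_neg, not_false_iff]
    rcases Nat.le_total a.length b.length with hab | hab
    · have hnil : a.reverse.drop (ii - 1) = [] := by
        apply List.drop_eq_nil_of_le; simp; omega
      rw [hnil]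
      rcases hdb : b.reverse.drop (ii - 1) with _ | ⟨y, ys⟩
      · have hlen := congrArg List.length hdb
        simp at hlen
        simp [listGE]
        omega
      · have hlen := congrArg List.length hdb
        simp at hlen
        simp [listGE]
        omega
    · have hnil : b.reverse.drop (ii - 1) = [] := by
        apply List.drop_eq_nil_of_le; simp; omega
      rw [hnil]
      cases a.reverse.drop (ii - 1) <;> simp [listGE] <;> omega
termination_by min a.length b.length + 1 - ii

-- ===== VERDICT (by name: the statement is the Claim_ definition above) =====
theorem greaterThanOrEqualTo_spec : Claim_equal_greaterThanOrEqualTo := by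
  intro a b _
  unfold Spec_greaterThanOrEqualTo greaterThanOrEqualTo greaterThanOrEqualTo_alt
  by_cases hb : b.length = 0
  · simp [List.length_eq_zero_iff.mp hb, listGE]
  · by_cases ha : a.length = 0
    · have hbr : b.reverse.length ≠ 0 := by simp [hb]
      rcases hrb : b.reverse with _ | ⟨z, zs⟩
      · exact absurd (by rw [hrb]; rfl) hbr
      · simp [hb, List.length_eq_zero_iff.mp ha, listGE]
    · have ha1 : 1 ≤ a.length := by omega
      have hb1 : 1 ≤ b.length := by omega
      have hda : 0 < a.reverse.length := by simp; omega
      have hdb : 0 < b.reverse.length := by simp; omega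
      simp only [ha, hb, beq_iff_eq, if_neg, not_false_iff]
      have e1 := pyGet_len_sub a 1 le_rfl ha1
      have e2 := pyGet_len_sub b 1 le_rfl hb1
      norm_num at e1 e2
      have hloop := loop_eq_listGE a b 1 le_rfl (by omega)
      norm_num at hloop
      have hsl : (if b.length > a.length then a.length else b.length) = min a.length b.length := by
        split <;> omega
      rw [e1, e2, hsl, hloop]
      have hra : a.reverse = a.reverse[0]'hda :: a.reverse.drop 1 := by
        rw [← List.drop_eq_getElem_cons hda, List.drop_zero]
      have hrb2 : b.reverse = b.reverse[0]'hdb :: b.reverse.drop 1 := by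
        rw [← List.drop_eq_getElem_cons hdb, List.drop_zero]
      have ga : a.reverse[0]'hda = a[a.length - 1]'(by omega) := by
        simp [List.getElem_reverse]
      have gb : b.reverse[0]'hdb = b[b.length - 1]'(by omega) := by
        simp [List.getElem_reverse]
      by_cases hgt : a[a.length - 1]'(by omega) > b[b.length - 1]'(by omega)
      · rw [if_pos hgt]
        conv_rhs => rw [hra, hrb2, listGE_cons]
        rw [ga, gb]
        simp [hgt]
      · by_cases hlt : a[a.length - 1]'(by omega) < b[b.length - 1]'(by omega)
        · rw [if_neg hgt, if_pos hlt]
          conv_rhs => rw [hra, hrb2, listGE_cons]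
          rw [ga, gb]
          simp [hgt, hlt]
        · rw [if_neg hgt, if_neg hlt]
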